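-- pv_equiv track=rewrite | github.com/pypi-data/pypi-mirror-382 | packages/tfq0seo/tfq0seo-2.2.0-py3-none-any.whl/tfq0seo/exporters/base.py | _get_all_fieldnames
-- ===== SOURCE A (Python) =====
-- from typing import Dict, List, Any, Optional, Union
--
-- def _get_all_fieldnames(rows: List[Dict]) -> List[str]:
--     """Get all unique fieldnames from rows"""
--     fieldnames = []
--     seen = set()
--
--     # Define preferred order
--     preferred_order = [
--         'url', 'final_url', 'title', 'title_length', 'description', 'description_length',
--         'status_code', 'load_time', 'score', 'score_meta', 'score_content', 'score_technical',
--         'score_performance', 'score_links', 'word_count', 'readability_score',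
--         'h1_count', 'h2_count', 'internal_links', 'external_links', 'broken_links',
--         'images_total', 'images_without_alt', 'issues_critical', 'issues_warning', 'issues_notice',
--         'https', 'mobile_friendly', 'canonical_url', 'has_structured_data'
--     ]
--
--     # Add preferred fields first
--     for field in preferred_order:
--         if any(field in row for row in rows):
--             fieldnames.append(field)
--             seen.add(field)
--
--     # Add remaining fields
--     for row in rows:
--         for field in row:
--             if field not in seen:
--                 fieldnames.append(field)
--                 seen.add(field)
--
--     return fieldnames
-- ===== SOURCE B (Python) =====
-- def _get_all_fieldnames(rows):
--     """Get all unique fieldnames from rows (single pass over the data)."""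
--     preferred_order = [
--         'url', 'final_url', 'title', 'title_length', 'description', 'description_length',
--         'status_code', 'load_time', 'score', 'score_meta', 'score_content', 'score_technical',
--         'score_performance', 'score_links', 'word_count', 'readability_score',
--         'h1_count', 'h2_count', 'internal_links', 'external_links', 'broken_links',
--         'images_total', 'images_without_alt', 'issues_critical', 'issues_warning', 'issues_notice',
--         'https', 'mobile_friendly', 'canonical_url', 'has_structured_data'
--     ]
--     order = []
--     keys = set()
--     for row in rows:
--         for field in row:
--             if field not in keys:
--                 order.append(field)
--                 keys.add(field)
--     pref_set = set(preferred_order)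
--     return [f for f in preferred_order if f in keys] + [k for k in order if k not in pref_set]
-- ===== Notes on version B (the rewrite author's own statement) =====
-- stated objective: alternative
-- what changed: B makes one pass over the rows building the first-seen key order and a key set, then filters the preferred list against that set and appends the non-preferred keys, instead of A's per-preferred-field any()-scan over all rows.
import Mathlib
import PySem

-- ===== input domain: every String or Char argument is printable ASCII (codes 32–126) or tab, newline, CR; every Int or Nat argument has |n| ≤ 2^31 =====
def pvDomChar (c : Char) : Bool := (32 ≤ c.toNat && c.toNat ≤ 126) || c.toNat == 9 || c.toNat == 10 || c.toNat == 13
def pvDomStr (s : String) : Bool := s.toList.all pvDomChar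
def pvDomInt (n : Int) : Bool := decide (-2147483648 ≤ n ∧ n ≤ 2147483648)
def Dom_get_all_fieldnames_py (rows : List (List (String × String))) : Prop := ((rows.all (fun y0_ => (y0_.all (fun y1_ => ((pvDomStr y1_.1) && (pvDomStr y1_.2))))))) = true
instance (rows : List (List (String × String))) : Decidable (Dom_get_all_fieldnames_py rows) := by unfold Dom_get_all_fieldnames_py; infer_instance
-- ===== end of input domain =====

-- B replaces A's per-preferred-field any()-scan of all rows by one pass over the rows
-- that builds the first-seen key order and a key set, then filters (objective: alternative).

-- the module-level preferred_order constant, shared by both programs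
def pvPreferredOrder : List String :=
  ["url", "final_url", "title", "title_length", "description", "description_length",
   "status_code", "load_time", "score", "score_meta", "score_content", "score_technical",
   "score_performance", "score_links", "word_count", "readability_score",
   "h1_count", "h2_count", "internal_links", "external_links", "broken_links",
   "images_total", "images_without_alt", "issues_critical", "issues_warning", "issues_notice",
   "https", "mobile_friendly", "canonical_url", "has_structured_data"]

-- ===== PORT A =====
def get_all_fieldnames_py (rows : List (List (String × String))) : List String :=
  -- fieldnames = []; seen = set(); for field in preferred_order: if any(field in row for row in rows): append+add
  let phase1 : List String × PySem.Set String :=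
    pvPreferredOrder.foldl
      (fun st field =>
        if rows.any (fun row => row.any (fun p => p.1 == field)) then
          (st.1 ++ [field], PySem.Set.add st.2 field)
        else st)
      ([], PySem.Set.empty)
  -- for row in rows: for field in row: if field not in seen: append+add
  let phase2 : List String × PySem.Set String :=
    rows.foldl
      (fun st row =>
        row.foldl
          (fun (st : List String × PySem.Set String) p =>
            if PySem.Set.contains st.2 p.1 then st
            else (st.1 ++ [p.1], PySem.Set.add st.2 p.1))
          st)
      phase1
  phase2.1

-- ===== PORT B =====
def get_all_fieldnames_py_alt (rows : List (List (String × String))) : List String :=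
  -- one pass: order = first-seen unique keys, keys = the key set
  let scan : List String × PySem.Set String :=
    rows.foldl
      (fun st row =>
        row.foldl
          (fun (st : List String × PySem.Set String) p =>
            if PySem.Set.contains st.2 p.1 then st
            else (st.1 ++ [p.1], PySem.Set.add st.2 p.1))
          st)
      ([], PySem.Set.empty)
  -- [f for f in preferred_order if f in keys] + [k for k in order if k not in pref_set]
  pvPreferredOrder.filter (fun f => PySem.Set.contains scan.2 f)
    ++ scan.1.filter (fun k => !(pvPreferredOrder.contains k))

-- ===== PRECONDITION & SPEC =====
def Spec_get_all_fieldnames_py (rows : List (List (String × String))) (out : List String) : Prop := out = get_all_fieldnames_py_alt rows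
instance (rows : List (List (String × String))) (out : List String) : Decidable (Spec_get_all_fieldnames_py rows out) := by unfold Spec_get_all_fieldnames_py; infer_instance

-- ===== CLAIM (what is proved, stated in full; the proofs are below) =====
def Claim_equal_get_all_fieldnames_py : Prop := ∀ (rows : List (List (String × String))), Dom_get_all_fieldnames_py rows → Spec_get_all_fieldnames_py rows (get_all_fieldnames_py rows)

-- ===== LEMMAS AND PROOFS =====

-- the dedup step both ports' inner loop performs
def pvStep (st : List String × PySem.Set String) (k : String) : List String × PySem.Set String :=
  if PySem.Set.contains st.2 k then st else (st.1 ++ [k], PySem.Set.add st.2 k)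

-- all keys of all rows, in traversal order
def pvKeysOf (rows : List (List (String × String))) : List String :=
  rows.flatMap (fun row => row.map Prod.fst)

-- abstract first-occurrence dedup against a boolean membership test m
def pvDD (m : String → Bool) : List String → List String
  | [] => []
  | k :: ks => if m k then pvDD m ks else k :: pvDD (fun x => x == k || m x) ks

lemma pvNested_eq_keys_foldl (rows : List (List (String × String)))
    (st : List String × PySem.Set String) :
    rows.foldl
      (fun st row =>
        row.foldl
          (fun (st : List String × PySem.Set String) p =>
            if PySem.Set.contains st.2 p.1 then st
            else (st.1 ++ [p.1], PySem.Set.add st.2 p.1))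
          st)
      st
    = (pvKeysOf rows).foldl pvStep st := by
  induction rows generalizing st with
  | nil => rfl
  | cons row rows ih =>
    simp only [List.foldl_cons, pvKeysOf, List.flatMap_cons, List.foldl_append, ih]
    congr 1
    rw [List.foldl_map]
    rfl

lemma pvContains_add (s : PySem.Set String) (k x : String) :
    PySem.Set.contains (PySem.Set.add s k) x = (x == k || PySem.Set.contains s x) := by
  by_cases hk : k ∈ s
  · simp only [PySem.Set.add_eq_ite, hk, if_true]
    by_cases hx : x = k <;> simp [hx, hk]
  · simp only [PySem.Set.add_eq_ite, hk, if_false]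
    by_cases hx : x = k <;> simp [hx, List.mem_append, hk]

lemma pvDD_cons (m : String → Bool) (k : String) (ks : List String) :
    pvDD m (k :: ks) = if m k then pvDD m ks else k :: pvDD (fun x => x == k || m x) ks := rfl

lemma pvStep_pos {l : List String} {s : PySem.Set String} {k : String}
    (h : PySem.Set.contains s k = true) : pvStep (l, s) k = (l, s) := by
  have hk : k ∈ s := by simpa using h
  simp [pvStep, hk]

lemma pvStep_neg {l : List String} {s : PySem.Set String} {k : String}
    (h : PySem.Set.contains s k = false) : pvStep (l, s) k = (l ++ [k], PySem.Set.add s k) := by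
  have hk : ¬ k ∈ s := by simpa using h
  simp [pvStep, hk]

lemma pvDD_congr (ks : List String) (m m' : String → Bool)
    (h : ∀ x ∈ ks, m x = m' x) :
    pvDD m ks = pvDD m' ks := by
  induction ks generalizing m m' with
  | nil => rfl
  | cons k ks ih =>
    simp only [pvDD, h k (by simp)]
    cases hm : m' k with
    | true => exact ih _ _ (fun x hx => h x (by simp [hx]))
    | false =>
      simp only [Bool.false_eq_true, if_false]
      congr 1
      exact ih _ _ (fun x hx => by simp [h x (by simp [hx])])

lemma pvFoldl_fst (ks : List String) (l : List String) (s : PySem.Set String) :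
    (ks.foldl pvStep (l, s)).1 = l ++ pvDD (fun x => PySem.Set.contains s x) ks := by
  induction ks generalizing l s with
  | nil => simp [pvDD]
  | cons k ks ih =>
    rw [List.foldl_cons, pvDD_cons]
    cases h : PySem.Set.contains s k with
    | true =>
      rw [pvStep_pos h, if_pos rfl, ih]
    | false =>
      rw [pvStep_neg h, if_neg (by simp), ih, List.append_assoc, List.singleton_append]
      exact congrArg (fun t => l ++ k :: t) (pvDD_congr ks _ _ (fun x _ => pvContains_add s k x))

lemma pvFoldl_snd (ks : List String) (l : List String) (s : PySem.Set String) (x : String) :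
    PySem.Set.contains ((ks.foldl pvStep (l, s)).2) x
      = (PySem.Set.contains s x || ks.contains x) := by
  induction ks generalizing l s with
  | nil => simp
  | cons k ks ih =>
    rw [List.foldl_cons]
    cases h : PySem.Set.contains s k with
    | true =>
      rw [pvStep_pos h, ih, List.contains_cons]
      by_cases hx : x = k
      · subst hx; simp at h ⊢; simp [h]
      · have hbk : (x == k) = false := by simp [hx]
        simp [hbk]
    | false =>
      rw [pvStep_neg h, ih, pvContains_add, List.contains_cons]
      by_cases hx : x = k
      · subst hx; simp
      · have hbk : (x == k) = false := by simp [hx]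
        simp [hbk, Bool.or_left_comm]

lemma pvDD_or_filter (ks : List String) (p m : String → Bool) :
    pvDD (fun x => p x || m x) ks = (pvDD m ks).filter (fun k => !(p k)) := by
  induction ks generalizing m with
  | nil => rfl
  | cons k ks ih =>
    rw [pvDD_cons, pvDD_cons]
    cases hp : p k with
    | true =>
      cases hm : m k with
      | true =>
        rw [if_pos (by simp [hp, hm]), if_pos rfl, ih]
      | false =>
        rw [if_pos (by simp [hp, hm]), if_neg (by simp), List.filter_cons,
          if_neg (by simp [hp])]
        rw [show (fun x => p x || m x) = (fun x => p x || (x == k || m x)) from by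
              funext x; by_cases hx : x = k
              · subst hx; simp [hp]
              · have hbk : (x == k) = false := by simp [hx]
                simp [hbk]]
        exact ih (fun x => x == k || m x)
    | false =>
      cases hm : m k with
      | true =>
        rw [if_pos (by simp [hp, hm]), if_pos rfl, ih]
      | false =>
        rw [if_neg (by simp [hp, hm]), if_neg (by simp), List.filter_cons,
          if_pos (by simp [hp])]
        congr 1
        rw [show (fun x => x == k || (p x || m x)) = (fun x => p x || (x == k || m x)) from by
              funext x; by_cases hx : x = k
              · subst hx; simp
              · have hbk : (x == k) = false := by simp [hx]
                simp [hbk]]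
        exact ih (fun x => x == k || m x)

-- emptiness of Set.empty, as a contains function
lemma pvContains_empty (x : String) :
    PySem.Set.contains (PySem.Set.empty : PySem.Set String) x = false := by
  simp [PySem.Set.empty]

-- A's phase-1 fold characterised: the filter of the preferred order
lemma pvPhase1 (pref : List String) (C : String → Bool) (l : List String) (s : PySem.Set String) :
    (pref.foldl (fun st field => if C field then (st.1 ++ [field], PySem.Set.add st.2 field) else st) (l, s))
      = (l ++ pref.filter C,
         (pref.filter C).foldl PySem.Set.add s) := by
  induction pref generalizing l s with
  | nil => simp
  | cons f pref ih =>
    cases h : C f with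
    | true => simp [h, List.filter_cons, ih]
    | false => simp [h, List.filter_cons, ih]

lemma pvContains_foldl_add (xs : List String) (s : PySem.Set String) (x : String) :
    PySem.Set.contains (xs.foldl PySem.Set.add s) x = (PySem.Set.contains s x || xs.contains x) := by
  induction xs generalizing s with
  | nil => simp
  | cons k xs ih =>
    simp only [List.foldl_cons, ih, pvContains_add, List.contains_cons]
    by_cases hx : x = k
    · subst hx; simp
    · have hbk : (x == k) = false := by simp [hx]
      simp [hbk, Bool.or_left_comm]

-- A's membership test over the rows is membership in the key list
lemma pvAny_eq_keys_contains (rows : List (List (String × String))) (f : String) :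
    rows.any (fun row => row.any (fun p => p.1 == f)) = (pvKeysOf rows).contains f := by
  induction rows with
  | nil => rfl
  | cons row rows ih =>
    simp only [List.any_cons, pvKeysOf, List.flatMap_cons, List.contains_append] at *
    rw [ih]
    congr 1
    induction row with
    | nil => rfl
    | cons p row ihr =>
      simp only [List.any_cons, List.map_cons, List.contains_cons, ihr]
      congr 1
      by_cases h : p.1 = f
      · simp [h]
      · have h1 : (p.1 == f) = false := by simp [h]
        have h2 : (f == p.1) = false := by
          simp only [beq_eq_false_iff_ne, ne_eq]
          exact fun h' => h h'.symm
        simp [h1, h2]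

-- ===== VERDICT (by name: the statement is the Claim_ definition above) =====
theorem get_all_fieldnames_py_spec : Claim_equal_get_all_fieldnames_py := by
  intro rows _
  unfold Spec_get_all_fieldnames_py
  simp only [get_all_fieldnames_py, get_all_fieldnames_py_alt]
  rw [pvNested_eq_keys_foldl, pvNested_eq_keys_foldl]
  rw [pvPhase1 pvPreferredOrder (fun field => rows.any fun row => row.any fun p => p.1 == field)
      [] PySem.Set.empty]
  rw [pvFoldl_fst, pvFoldl_fst]
  simp only [List.nil_append]
  congr 1
  · -- preferred part: A's per-field any-scan equals membership in B's key set
    apply List.filter_congr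
    intro f _
    rw [pvFoldl_snd, pvAny_eq_keys_contains, pvContains_empty, Bool.false_or]
  · -- remaining part
    have e0 : pvDD (fun x => PySem.Set.contains PySem.Set.empty x) (pvKeysOf rows)
        = pvDD (fun _ : String => false) (pvKeysOf rows) :=
      pvDD_congr _ _ _ (fun x _ => pvContains_empty x)
    have e1 : pvDD (fun x => PySem.Set.contains
          ((pvPreferredOrder.filter (fun field => rows.any fun row => row.any fun p => p.1 == field)).foldl
            PySem.Set.add PySem.Set.empty) x) (pvKeysOf rows)
        = pvDD (fun x => pvPreferredOrder.contains x || (fun _ : String => false) x) (pvKeysOf rows) := by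
      apply pvDD_congr
      intro x hx
      rw [pvContains_foldl_add, pvContains_empty, Bool.false_or, Bool.or_false]
      have hCx : (rows.any fun row => row.any fun p => p.1 == x) = true := by
        rw [pvAny_eq_keys_contains]; simpa using hx
      by_cases hp : x ∈ pvPreferredOrder
      · simp [List.mem_filter, hp, hCx]
      · simp [List.mem_filter, hp]
    rw [e1, pvDD_or_filter, e0]
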